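-- pv_equiv track=rewrite | github.com/rodom1018/NetWork_Project | Network#4/ChatTCPClient.py | validnickname
-- ===== SOURCE A (Python) =====
-- def validnickname(nickname):
--     if len(nickname) > 32:
--         return False
--     for letter in nickname:
--         if (letter >= "A") and (letter <= "Z"):
--             continue
--         if (letter >= "a") and (letter <= "z"):
--             continue
--         if letter == "-":
--             continue
--         return False
--     return True
-- ===== SOURCE B (Python) =====
-- import re
--
-- _NICK_RE = re.compile(r'[A-Za-z-]{0,32}')
--
-- def validnickname(nickname):
--     return _NICK_RE.fullmatch(nickname) is not None
-- ===== Notes on version B (the rewrite author's own statement) =====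
-- stated objective: idiomatic
-- what changed: Replaced the explicit length guard and per-character range-comparison loop with a single precompiled regex fullmatch of [A-Za-z-]{0,32}.
import Mathlib
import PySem

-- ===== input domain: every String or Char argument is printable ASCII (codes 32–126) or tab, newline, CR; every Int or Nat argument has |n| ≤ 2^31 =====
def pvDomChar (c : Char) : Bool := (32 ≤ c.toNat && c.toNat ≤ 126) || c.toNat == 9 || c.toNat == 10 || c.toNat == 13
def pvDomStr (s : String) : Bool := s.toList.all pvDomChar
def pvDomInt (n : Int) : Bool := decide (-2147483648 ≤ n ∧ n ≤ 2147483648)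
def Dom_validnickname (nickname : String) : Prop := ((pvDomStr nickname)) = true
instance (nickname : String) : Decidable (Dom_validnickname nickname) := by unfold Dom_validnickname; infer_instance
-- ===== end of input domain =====

-- B replaces A's explicit length guard + per-character range-comparison loop with a single
-- regex fullmatch of [A-Za-z-]{0,32}, ported below as its meaning: length cap + character class.

-- ===== PORT A =====
-- the 'for letter in nickname' loop, branch for branch
def vaLoop : List Char → Bool
  | [] => true
  | c :: rest =>
    if 'A' ≤ c ∧ c ≤ 'Z' then vaLoop rest
    else if 'a' ≤ c ∧ c ≤ 'z' then vaLoop rest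
    else if c = '-' then vaLoop rest
    else false

def validnickname (nickname : String) : Bool :=
  if PySem.Str.len nickname > 32 then false
  else vaLoop nickname.toList

-- ===== PORT B =====
-- re.fullmatch(r'[A-Za-z-]{0,32}', nickname) is not None: the {0,32} quantifier is the
-- length cap, the class [A-Za-z-] is ASCII letters or a literal '-'
def validnickname_alt (nickname : String) : Bool :=
  decide (nickname.toList.length ≤ 32) && nickname.toList.all (fun c => c.isAlpha || c == '-')

-- ===== PRECONDITION & SPEC =====
def Spec_validnickname (nickname : String) (out : Bool) : Prop := out = validnickname_alt nickname
instance (nickname : String) (out : Bool) : Decidable (Spec_validnickname nickname out) := by unfold Spec_validnickname; infer_instance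

-- ===== CLAIM (what is proved, stated in full; the proofs are below) =====
def Claim_equal_validnickname : Prop := ∀ (nickname : String), Dom_validnickname nickname → Spec_validnickname nickname (validnickname nickname)

-- ===== LEMMAS AND PROOFS =====
-- one character of A's loop body equals one character of B's class test
theorem vaChar_eq (c : Char) :
    (if 'A' ≤ c ∧ c ≤ 'Z' then true else if 'a' ≤ c ∧ c ≤ 'z' then true else if c = '-' then true else false)
      = (c.isAlpha || c == '-') := by
  have hdash : (c = '-') ↔ c.toNat = 45 := by rw [Char.ext_iff, ← UInt32.toNat_inj]; rfl
  simp only [Char.isAlpha, Char.isUpper, Char.isLower, Char.le_def, Char.ext_iff,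
    ← UInt32.toNat_inj, UInt32.le_iff_toNat_le]
  split_ifs with h1 h2 h3 <;> simp_all [hdash]

theorem vaLoop_eq_all (l : List Char) :
    vaLoop l = l.all (fun c => c.isAlpha || c == '-') := by
  induction l with
  | nil => rfl
  | cons c rest ih =>
    have h := vaChar_eq c
    simp only [vaLoop, List.all_cons, ih]
    split_ifs at h ⊢ with h1 h2 h3 <;> simp_all

-- ===== VERDICT (by name: the statement is the Claim_ definition above) =====
theorem validnickname_spec : Claim_equal_validnickname := by
  intro nickname _
  unfold Spec_validnickname validnickname validnickname_alt
  rw [vaLoop_eq_all]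
  have hlen := PySem.Str.len_eq nickname
  have e : nickname.toList.length = nickname.length := String.length_toList
  by_cases h : PySem.Str.len nickname > 32
  · have h' : ¬ nickname.length ≤ 32 := by omega
    simp [h']
  · have h' : nickname.length ≤ 32 := by omega
    simp [h']
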